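-- pv_equiv track=rewrite | github.com/MangkiCS/selfevolvingagent | agent/core/task_context.py | _normalise_completed
-- ===== SOURCE A (Python) =====
-- from typing import Any, Iterable, Sequence
--
-- def _normalise_completed(completed: Iterable[str] | None) -> tuple[str, ...]:
--     '''Return a sorted tuple of normalised completed task identifiers.'''
--     if completed is None:
--         return ()
--     normalised: set[str] = set()
--     for entry in completed:
--         if entry is None:
--             continue
--         text = str(entry).strip()
--         if not text:
--             continue
--         normalised.add(text)
--     return tuple(sorted(normalised))
-- ===== SOURCE B (Python) =====
-- def _insert_sorted_unique(result, text):
--     """Return result with text merged into the strictly increasing list result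
--     (binary search for the position; no change if already present)."""
--     lo = 0
--     hi = len(result)
--     while lo < hi:
--         mid = (lo + hi) // 2
--         if result[mid] < text:
--             lo = mid + 1
--         else:
--             hi = mid
--     if lo == len(result) or result[lo] != text:
--         result.insert(lo, text)
--     return result
--
--
-- def _normalise_completed(completed):
--     """Return a sorted tuple of normalised completed task identifiers."""
--     if completed is None:
--         return ()
--     result = []
--     for entry in completed:
--         if entry is None:
--             continue
--         text = str(entry).strip()
--         if not text:
--             continue
--         result = _insert_sorted_unique(result, text)
--     return tuple(result)
-- ===== Notes on version B (the rewrite author's own statement) =====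
-- stated objective: alternative
-- what changed: Replaces A's hash-set accumulation followed by a final sort with a single pass that maintains a strictly increasing duplicate-free list throughout, merging each stripped entry in by a binary-search insertion (online insertion sort with dedup); no set and no sort call are used.
import Mathlib
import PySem

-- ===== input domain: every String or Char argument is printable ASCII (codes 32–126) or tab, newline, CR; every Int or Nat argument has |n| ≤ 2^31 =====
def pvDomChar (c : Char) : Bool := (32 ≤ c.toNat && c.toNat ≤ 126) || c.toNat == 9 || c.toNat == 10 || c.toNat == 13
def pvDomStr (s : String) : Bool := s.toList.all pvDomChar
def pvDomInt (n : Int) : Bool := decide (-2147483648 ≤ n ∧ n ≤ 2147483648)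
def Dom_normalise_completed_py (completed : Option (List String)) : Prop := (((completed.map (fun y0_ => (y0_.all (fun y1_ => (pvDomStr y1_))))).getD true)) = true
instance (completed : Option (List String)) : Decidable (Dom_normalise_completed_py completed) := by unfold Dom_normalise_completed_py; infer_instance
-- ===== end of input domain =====

-- B differs from A: instead of accumulating a hash set and sorting it at the end, B keeps a
-- strictly increasing duplicate-free list throughout, merging each stripped entry in by a
-- binary-search insertion; return value only (neither version mutates its argument).
-- ===== PORT A =====
def normalise_completed_py (completed : Option (List String)) : List String :=
  match completed with
  | none => []
  | some xs =>
    let normalised : PySem.Set String :=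
      xs.foldl (fun s entry =>
        let text := PySem.Str.strip entry
        if text = "" then s else PySem.Set.add s text) PySem.Set.empty
    PySem.List.sorted normalised (fun x => x) false

-- ===== PORT B =====
-- the `while lo < hi` binary-search loop of _insert_sorted_unique; indices are Nats with
-- lo ≤ mid < hi ≤ len at every access, so result[mid] is ported exactly as getD mid ""
def bisectLeft (l : List String) (text : String) (lo hi : Nat) : Nat :=
  if _h : lo < hi then
    if l.getD ((lo + hi) / 2) "" < text then bisectLeft l text ((lo + hi) / 2 + 1) hi
    else bisectLeft l text lo ((lo + hi) / 2)
  else lo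
termination_by hi - lo
decreasing_by all_goals omega

-- _insert_sorted_unique from Source B: result.insert(lo, text) is PySem.List.insert at the
-- (always in-range, nonnegative) position lo; result[lo] is only read when lo < len (getD)
def insertSortedUnique (result : List String) (text : String) : List String :=
  if bisectLeft result text 0 result.length = result.length
      ∨ result.getD (bisectLeft result text 0 result.length) "" ≠ text then
    PySem.List.insert result ((bisectLeft result text 0 result.length : Nat) : Int) text
  else result

def normalise_completed_py_alt (completed : Option (List String)) : List String :=
  match completed with
  | none => []
  | some xs =>
    xs.foldl (fun result entry =>
      let text := PySem.Str.strip entry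
      if text = "" then result else insertSortedUnique result text) []

-- ===== PRECONDITION & SPEC =====
def Spec_normalise_completed_py (completed : Option (List String)) (out : List String) : Prop := out = normalise_completed_py_alt completed
instance (completed : Option (List String)) (out : List String) : Decidable (Spec_normalise_completed_py completed out) := by unfold Spec_normalise_completed_py; infer_instance

-- ===== CLAIM (what is proved, stated in full; the proofs are below) =====
def Claim_equal_normalise_completed_py : Prop := ∀ (completed : Option (List String)), Dom_normalise_completed_py completed → Spec_normalise_completed_py completed (normalise_completed_py completed)

-- ===== LEMMAS AND PROOFS =====

-- in a strictly increasing list, getD is strictly monotone on in-range indices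
theorem pvSorted_getD_lt (l : List String) (hs : l.Pairwise (· < ·))
    {i j : Nat} (hij : i < j) (hj : j < l.length) :
    l.getD i "" < l.getD j "" := by
  have h := List.pairwise_iff_getElem.mp hs i j (by omega) hj hij
  rwa [List.getD_eq_getElem l "" (by omega), List.getD_eq_getElem l "" hj]

-- the binary search returns the leftmost position whose element is ≥ text
theorem bisectLeft_spec (l : List String) (text : String) (hs : l.Pairwise (· < ·)) :
    ∀ lo hi, hi ≤ l.length → lo ≤ hi →
    (∀ i, i < lo → l.getD i "" < text) →
    (∀ i, hi ≤ i → i < l.length → ¬ l.getD i "" < text) →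
    lo ≤ bisectLeft l text lo hi ∧ bisectLeft l text lo hi ≤ hi ∧
    (∀ i, i < bisectLeft l text lo hi → l.getD i "" < text) ∧
    (∀ i, bisectLeft l text lo hi ≤ i → i < l.length → ¬ l.getD i "" < text) := by
  intro lo hi
  induction lo, hi using bisectLeft.induct l text with
  | case1 lo hi hlt hmid ih =>
    intro hhi hlo hbelow habove
    rw [bisectLeft, dif_pos hlt, if_pos hmid]
    have harg : ∀ i, i < (lo + hi) / 2 + 1 → l.getD i "" < text := by
      intro i hi'
      rcases Nat.lt_or_ge i ((lo + hi) / 2) with h' | h'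
      · exact lt_trans (pvSorted_getD_lt l hs h' (by omega)) hmid
      · have hieq : i = (lo + hi) / 2 := by omega
        exact hieq ▸ hmid
    have h := ih (by omega) (by omega) harg habove
    exact ⟨le_trans (by omega : lo ≤ (lo + hi) / 2 + 1) h.1, h.2.1, h.2.2.1, h.2.2.2⟩
  | case2 lo hi hlt hmid ih =>
    intro hhi hlo hbelow habove
    rw [bisectLeft, dif_pos hlt, if_neg hmid]
    have harg : ∀ i, (lo + hi) / 2 ≤ i → i < l.length → ¬ l.getD i "" < text := by
      intro i hge hlen hcon
      rcases Nat.lt_or_ge ((lo + hi) / 2) i with h'' | h''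
      · exact hmid (lt_trans (pvSorted_getD_lt l hs h'' hlen) hcon)
      · have hieq : i = (lo + hi) / 2 := by omega
        exact hmid (hieq ▸ hcon)
    have h := ih (by omega) (by omega) hbelow harg
    exact ⟨h.1, le_trans h.2.1 (by omega), h.2.2.1, h.2.2.2⟩
  | case3 lo hi hge =>
    intro hhi hlo hbelow habove
    rw [bisectLeft, dif_neg hge]
    exact ⟨le_refl _, hlo, fun i hi' => hbelow i (by omega), fun i hge' hlen => habove i (by omega) hlen⟩

-- the position used by insertSortedUnique
theorem pvPos_spec (l : List String) (text : String) (hs : l.Pairwise (· < ·)) :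
    bisectLeft l text 0 l.length ≤ l.length ∧
    (∀ i, i < bisectLeft l text 0 l.length → l.getD i "" < text) ∧
    (∀ i, bisectLeft l text 0 l.length ≤ i → i < l.length → ¬ l.getD i "" < text) := by
  have h := bisectLeft_spec l text hs 0 l.length (le_refl _) (Nat.zero_le _)
    (fun i hi => by omega) (fun i hge hlen => by omega)
  exact ⟨h.2.1, h.2.2.1, h.2.2.2⟩

theorem mem_insertSortedUnique (l : List String) (t x : String) (hs : l.Pairwise (· < ·)) :
    x ∈ insertSortedUnique l t ↔ x = t ∨ x ∈ l := by
  unfold insertSortedUnique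
  obtain ⟨hle, _, _⟩ := pvPos_spec l t hs
  set pos := bisectLeft l t 0 l.length with hpos
  split_ifs with hcond
  · rw [PySem.List.insert_natCast l pos t hle,
      show t :: l.drop pos = [t] ++ l.drop pos from rfl, ← List.append_assoc]
    constructor
    · intro hx
      rcases List.mem_append.mp hx with hx | hx
      · rcases List.mem_append.mp hx with hx | hx
        · exact Or.inr (List.mem_of_mem_take hx)
        · exact Or.inl (List.mem_singleton.mp hx)
      · exact Or.inr (List.mem_of_mem_drop hx)
    · rintro (rfl | hx)
      · simp
      · rw [← List.take_append_drop pos l] at hx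
        rcases List.mem_append.mp hx with hx | hx
        · exact List.mem_append.mpr (Or.inl (List.mem_append.mpr (Or.inl hx)))
        · exact List.mem_append.mpr (Or.inr hx)
  · push Not at hcond
    obtain ⟨hne, heq⟩ := hcond
    have hlt : pos < l.length := lt_of_le_of_ne hle hne
    have htmem : t ∈ l := by
      rw [← heq, List.getD_eq_getElem l "" hlt]
      exact List.getElem_mem hlt
    constructor
    · exact fun hx => Or.inr hx
    · rintro (rfl | hx)
      · exact htmem
      · exact hx

theorem pairwise_insertSortedUnique (l : List String) (t : String)
    (hs : l.Pairwise (· < ·)) : (insertSortedUnique l t).Pairwise (· < ·) := by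
  unfold insertSortedUnique
  obtain ⟨hle, hbelow, habove⟩ := pvPos_spec l t hs
  set pos := bisectLeft l t 0 l.length with hpos
  split_ifs with hcond
  · rw [PySem.List.insert_natCast l pos t hle,
      show t :: l.drop pos = [t] ++ l.drop pos from rfl, ← List.append_assoc]
    -- every element of take pos is < t, and t < every element of drop pos
    have htake : ∀ a ∈ l.take pos, a < t := by
      intro a ha
      obtain ⟨i, hi, hget⟩ := List.getElem_of_mem ha
      have hilen : i < l.length := lt_of_lt_of_le (lt_of_lt_of_le hi (by simp [List.length_take])) (le_refl _)
      have hipos : i < pos := lt_of_lt_of_le hi (by simp [List.length_take])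
      have : a = l.getD i "" := by
        rw [List.getD_eq_getElem l "" (by omega), ← hget, List.getElem_take]
      exact this ▸ hbelow i hipos
    have hdrop : ∀ b ∈ l.drop pos, t < b := by
      intro b hb
      obtain ⟨j, hj, hget⟩ := List.getElem_of_mem hb
      have hjlen : pos + j < l.length := by
        have := List.length_drop (l := l) (i := pos); omega
      have hbj : b = l.getD (pos + j) "" := by
        rw [List.getD_eq_getElem l "" hjlen, ← hget, List.getElem_drop]
      have hge : ¬ l.getD (pos + j) "" < t := habove (pos + j) (by omega) hjlen
      have hnet : l.getD (pos + j) "" ≠ t := by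
        rcases hcond with hlen | hne
        · omega
        · intro hEq
          rcases Nat.eq_zero_or_pos j with rfl | hjpos
          · exact hne (by simpa using hEq)
          · have hposlen : pos < l.length := by omega
            have := pvSorted_getD_lt l hs (i := pos) (j := pos + j) (by omega) hjlen
            have hge0 : ¬ l.getD pos "" < t := habove pos (le_refl _) hposlen
            rw [hEq] at this
            exact hge0 this
      exact hbj ▸ lt_of_le_of_ne (le_of_not_gt hge) (Ne.symm hnet)
    have hl : (l.take pos).Pairwise (· < ·) ∧ (l.drop pos).Pairwise (· < ·) ∧
        ∀ a ∈ l.take pos, ∀ b ∈ l.drop pos, a < b := by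
      have := (List.pairwise_append (l₁ := l.take pos) (l₂ := l.drop pos)).mp
        (by rw [List.take_append_drop]; exact hs)
      exact this
    rw [List.append_assoc, List.pairwise_append]
    refine ⟨hl.1, ?_, ?_⟩
    · rw [List.singleton_append, List.pairwise_cons]
      exact ⟨fun b hb => hdrop b hb, hl.2.1⟩
    · intro a ha b hb
      rcases List.mem_cons.mp (by simpa using hb) with rfl | hb'
      · exact htake a ha
      · exact hl.2.2 a ha b hb'
  · exact hs

-- the normalised entries, as a list in input order
def pvItems (xs : List String) : List String :=
  xs.filterMap (fun e => let t := PySem.Str.strip e; if t = "" then none else some t)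

-- A's loop builds the Python set of pvItems
theorem pvSet_foldl (xs : List String) (s : PySem.Set String) :
    xs.foldl (fun s entry =>
      let text := PySem.Str.strip entry
      if text = "" then s else PySem.Set.add s text) s
    = (pvItems xs).foldl PySem.Set.add s := by
  induction xs generalizing s with
  | nil => simp [pvItems]
  | cons e rest ih =>
    simp only [List.foldl, pvItems, List.filterMap_cons]
    by_cases h : PySem.Str.strip e = "" <;> simp [h, ih, pvItems]

-- B's loop folds insertSortedUnique over pvItems
theorem pvAlt_foldl (xs : List String) (acc : List String) :
    xs.foldl (fun result entry =>
      let text := PySem.Str.strip entry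
      if text = "" then result else insertSortedUnique result text) acc
    = (pvItems xs).foldl insertSortedUnique acc := by
  induction xs generalizing acc with
  | nil => simp [pvItems]
  | cons e rest ih =>
    simp only [List.foldl, pvItems, List.filterMap_cons]
    by_cases h : PySem.Str.strip e = "" <;> simp [h, ih, pvItems]

-- invariant of B's accumulation over any list of items
theorem pvFold_invariant (items : List String) (acc : List String)
    (hacc : acc.Pairwise (· < ·)) :
    (items.foldl insertSortedUnique acc).Pairwise (· < ·)
    ∧ (∀ x, x ∈ items.foldl insertSortedUnique acc ↔ x ∈ acc ∨ x ∈ items) := by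
  induction items generalizing acc with
  | nil => simpa using hacc
  | cons t rest ih =>
    simp only [List.foldl]
    have hres := ih (insertSortedUnique acc t) (pairwise_insertSortedUnique acc t hacc)
    refine ⟨hres.1, fun x => ?_⟩
    rw [hres.2 x, mem_insertSortedUnique acc t x hacc]
    simp [List.mem_cons]; tauto

-- ===== VERDICT (by name: the statement is the Claim_ definition above) =====
theorem normalise_completed_py_spec : Claim_equal_normalise_completed_py := by
  intro completed _
  unfold Spec_normalise_completed_py normalise_completed_py normalise_completed_py_alt
  cases completed with
  | none => rfl
  | some xs =>
    simp only
    rw [pvSet_foldl, pvAlt_foldl]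
    have hofList : (pvItems xs).foldl PySem.Set.add PySem.Set.empty
        = PySem.Set.ofList (pvItems xs) := (PySem.Set.ofList_eq_foldl _).symm
    rw [hofList]
    have hinv := pvFold_invariant (pvItems xs) [] List.Pairwise.nil
    set R := (pvItems xs).foldl insertSortedUnique [] with hR
    have hRnodup : R.Nodup := hinv.1.imp (fun h => ne_of_lt h)
    have hSnodup : (PySem.Set.ofList (pvItems xs) : List String).Nodup :=
      PySem.Set.nodup_ofList _
    have hperm : R.Perm (PySem.Set.ofList (pvItems xs)) := by
      rw [List.perm_ext_iff_of_nodup hRnodup hSnodup]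
      intro a
      rw [hinv.2 a]
      simp [PySem.Set.mem_ofList]
    exact PySem.List.sorted_eq_of_perm_of_pairwise_lt _ _ (fun x => x) hperm hinv.1
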